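-- pv_equiv track=rewrite | github.com/kmk142789/kmk142789 | packages/core/src/echo/hypernova/symphony.py | _measures_from_notes
-- ===== SOURCE A (Python) =====
-- from typing import List, Mapping, Sequence, Tuple
--
-- def _measures_from_notes(notes: Sequence[int], measure_length: int = 4) -> List[List[int]]:
--     measures: List[List[int]] = []
--     for index in range(0, len(notes), measure_length):
--         measures.append(list(notes[index : index + measure_length]))
--     if measures and len(measures[-1]) < measure_length:
--         last = measures[-1]
--         last.extend([last[-1]] * (measure_length - len(last)))
--     return measures
-- ===== SOURCE B (Python) =====
-- from typing import List, Sequence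
--
-- def _measures_from_notes(notes: Sequence[int], measure_length: int = 4) -> List[List[int]]:
--     if measure_length <= 0:
--         return []
--     measures: List[List[int]] = []
--     current: List[int] = []
--     for note in notes:
--         current.append(note)
--         if len(current) == measure_length:
--             measures.append(current)
--             current = []
--     if current:
--         current += [current[-1]] * (measure_length - len(current))
--         measures.append(current)
--     return measures
-- ===== Notes on version B (the rewrite author's own statement) =====
-- stated objective: alternative
-- what changed: B replaces A's stride-indexed slicing loop plus post-hoc mutation of the last slice by a single element-wise pass with a current-measure buffer: each note is appended to the buffer, full buffers are flushed to the output, and a leftover buffer is padded once at the end.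
import Mathlib
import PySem

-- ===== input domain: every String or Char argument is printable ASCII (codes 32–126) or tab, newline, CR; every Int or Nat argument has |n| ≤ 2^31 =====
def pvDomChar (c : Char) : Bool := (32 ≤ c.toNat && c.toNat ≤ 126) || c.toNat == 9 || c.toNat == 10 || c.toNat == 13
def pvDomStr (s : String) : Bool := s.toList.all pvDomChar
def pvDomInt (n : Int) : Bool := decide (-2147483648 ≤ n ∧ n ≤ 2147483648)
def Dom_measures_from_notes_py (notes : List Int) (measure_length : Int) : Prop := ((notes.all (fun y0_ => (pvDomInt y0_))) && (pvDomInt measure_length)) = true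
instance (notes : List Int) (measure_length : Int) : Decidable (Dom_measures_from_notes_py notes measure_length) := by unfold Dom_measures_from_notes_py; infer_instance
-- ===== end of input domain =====

-- B replaces A's stride-indexed slicing loop (plus post-hoc mutation of the last slice)
-- by a single element-wise pass with a current-measure buffer flushed when full and
-- padded once at the end; same cost, different algorithm/decomposition.

-- ===== PORT A =====
-- the trailing 'if measures and len(measures[-1]) < measure_length: last.extend(...)' block of A
-- ('last' is provably nonempty whenever this branch fires, so getLastD's default is never used)
def pvPadLast (measure_length : Int) (measures : List (List Int)) : List (List Int) :=
  match measures.getLast? with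
  | none => measures
  | some last =>
    if (last.length : Int) < measure_length then
      measures.dropLast ++
        [last ++ List.replicate (measure_length - (last.length : Int)).toNat (last.getLastD 0)]
    else measures

def measures_from_notes_py (notes : List Int) (measure_length : Int) : List (List Int) :=
  pvPadLast measure_length
    ((PySem.List.pyRange 0 (notes.length : Int) measure_length).foldl
      (fun acc index => acc ++ [PySem.List.slice notes (some index) (some (index + measure_length))]) [])

-- ===== PORT B =====
-- 'current.append(note); if len(current)==measure_length: flush' as a fold over the notes;
-- in the final pad, measure_length > current.length there, so Int subtraction + toNat is
-- exactly Python's nonnegative repeat count, and current is nonempty so getLastD's default is unused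
def measures_from_notes_py_alt (notes : List Int) (measure_length : Int) : List (List Int) :=
  if measure_length ≤ 0 then []
  else
    let st := notes.foldl
      (fun (p : List (List Int) × List Int) note =>
        let cur := p.2 ++ [note]
        if (cur.length : Int) = measure_length then (p.1 ++ [cur], []) else (p.1, cur))
      ([], [])
    if st.2 = [] then st.1
    else st.1 ++ [st.2 ++ List.replicate (measure_length - (st.2.length : Int)).toNat (st.2.getLastD 0)]

-- ===== PRECONDITION & SPEC =====
-- Python's range(0, len(notes), 0) raises ValueError, i.e. A raises iff measure_length = 0
def Pre_measures_from_notes_py (notes : List Int) (measure_length : Int) : Prop :=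
  measure_length ≠ 0
instance (notes : List Int) (measure_length : Int) : Decidable (Pre_measures_from_notes_py notes measure_length) := by unfold Pre_measures_from_notes_py; infer_instance

def pvWitness_measures_from_notes_py : List Int × Int := ([1, 2, 3], 2)

def Spec_measures_from_notes_py (notes : List Int) (measure_length : Int) (out : List (List Int)) : Prop := out = measures_from_notes_py_alt notes measure_length
instance (notes : List Int) (measure_length : Int) (out : List (List Int)) : Decidable (Spec_measures_from_notes_py notes measure_length out) := by unfold Spec_measures_from_notes_py; infer_instance

-- ===== CLAIM (what is proved, stated in full; the proofs are below) =====
def Claim_equal_measures_from_notes_py : Prop := ∀ (notes : List Int) (measure_length : Int), Dom_measures_from_notes_py notes measure_length → Pre_measures_from_notes_py notes measure_length → Spec_measures_from_notes_py notes measure_length (measures_from_notes_py notes measure_length)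

-- ===== LEMMAS AND PROOFS =====

-- the canonical chunking both ports compute (chunk size k+1; only the last chunk is short,
-- and it is padded with its own last element)
def pvChunkPad (k : Nat) (xs : List Int) : List (List Int) :=
  if h : xs = [] then []
  else
    (xs.take (k + 1) ++ List.replicate (k + 1 - xs.length) ((xs.take (k + 1)).getLastD 0))
      :: pvChunkPad k (xs.drop (k + 1))
termination_by xs.length
decreasing_by
  cases xs with
  | nil => exact absurd rfl h
  | cons a t => simp

lemma pvChunkPad_nil (k : Nat) : pvChunkPad k [] = [] := by
  rw [pvChunkPad]; simp

lemma pvChunkPad_cons (k : Nat) (xs : List Int) (h : xs ≠ []) :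
    pvChunkPad k xs =
      (xs.take (k + 1) ++ List.replicate (k + 1 - xs.length) ((xs.take (k + 1)).getLastD 0))
        :: pvChunkPad k (xs.drop (k + 1)) := by
  rw [pvChunkPad]; simp [h]

-- number of blocks Python's range(0, n, s) produces (s > 0)
def pvCnt (s n : Int) : Nat := if 0 < n then ((n + s - 1) / s).toNat else 0

lemma pvPyRange_cnt (s n : Int) (hs : 0 < s) :
    PySem.List.pyRange 0 n s = (List.range (pvCnt s n)).map (fun k : Nat => s * (k : Int)) := by
  rw [PySem.List.pyRange_of_pos _ _ hs]
  simp only [pvCnt, zero_add, sub_zero]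

lemma pvCnt_succ (s n : Int) (hs : 0 < s) (hn : 0 < n) :
    pvCnt s n = pvCnt s (n - s) + 1 := by
  unfold pvCnt
  rw [if_pos hn]
  by_cases h : 0 < n - s
  · rw [if_pos h]
    have e1 : n + s - 1 = (n - s + s - 1) + 1 * s := by ring
    rw [e1, Int.add_mul_ediv_right _ _ hs.ne']
    have h0 : 0 ≤ (n - s + s - 1) / s := Int.ediv_nonneg (by omega) hs.le
    omega
  · rw [if_neg h]
    have h1 : (1 : Int) ≤ (n + s - 1) / s := (Int.le_ediv_iff_mul_le hs).2 (by omega)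
    have h2 : (n + s - 1) / s < 2 := (Int.ediv_lt_iff_lt_mul hs).2 (by omega)
    omega

def pvMsl (s : Int) (xs : List Int) : List (List Int) :=
  (PySem.List.pyRange 0 (xs.length : Int) s).map
    (fun i => PySem.List.slice xs (some i) (some (i + s)))

lemma pvMsl_nil (s : Int) (hs : 0 < s) : pvMsl s [] = [] := by
  simp [pvMsl, pvPyRange_cnt s 0 hs, pvCnt]

lemma pvSliceBlock (s : Int) (hs : 0 < s) (xs : List Int) (k : Nat) :
    PySem.List.slice xs (some (s * ((k : Int) + 1))) (some (s * ((k : Int) + 1) + s)) =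
      PySem.List.slice (xs.drop s.toNat) (some (s * (k : Int))) (some (s * (k : Int) + s)) := by
  have hx : (0 : Int) ≤ s * (k : Int) := by positivity
  rw [PySem.List.slice_toNat xs (by positivity) (by positivity),
      PySem.List.slice_toNat _ hx (by omega)]
  rw [List.drop_drop]
  have e1 : s * ((k : Int) + 1) = s + s * (k : Int) := by ring
  have e2 : (s * ((k : Int) + 1)).toNat = s.toNat + (s * (k : Int)).toNat := by
    rw [e1, Int.toNat_add hs.le hx]
  have e3 : (s * ((k : Int) + 1) + s).toNat = (s * ((k : Int) + 1)).toNat + s.toNat := by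
    rw [Int.toNat_add (by positivity) hs.le]
  have e4 : (s * (k : Int) + s).toNat = (s * (k : Int)).toNat + s.toNat := by
    rw [Int.toNat_add hx hs.le]
  rw [e3, e4, e2]
  congr 1
  omega

lemma pvMsl_cons (s : Int) (hs : 0 < s) (xs : List Int) (h : xs ≠ []) :
    pvMsl s xs = xs.take s.toNat :: pvMsl s (xs.drop s.toNat) := by
  have hn : 0 < (xs.length : Int) := by
    have := List.length_pos_of_ne_nil h
    exact_mod_cast this
  unfold pvMsl
  rw [pvPyRange_cnt s _ hs, pvPyRange_cnt s _ hs]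
  have hcd : pvCnt s (((xs.drop s.toNat).length : Nat) : Int) = pvCnt s ((xs.length : Int) - s) := by
    simp only [List.length_drop, pvCnt]
    have hst : ((s.toNat : Nat) : Int) = s := Int.toNat_of_nonneg hs.le
    by_cases hms : s.toNat < xs.length
    · have hc : ((xs.length - s.toNat : Nat) : Int) = (xs.length : Int) - s := by
        omega
      rw [hc]
    · have h1 : xs.length - s.toNat = 0 := by omega
      have h2 : ¬ (0 : Int) < (xs.length : Int) - s := by omega
      rw [h1, if_neg (by norm_num), if_neg h2]
  rw [hcd, pvCnt_succ s _ hs hn, List.range_succ_eq_map]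
  simp only [List.map_map, List.map_cons]
  congr 1
  · have e0 : s * ((0 : Nat) : Int) = (0 : Int) := by simp
    rw [e0, show (0 : Int) + s = s from zero_add s,
        PySem.List.slice_toNat xs le_rfl hs.le]
    simp
  · apply List.map_congr_left
    intro k _
    simp only [Function.comp_apply]
    rw [show ((Nat.succ k : Nat) : Int) = (k : Int) + 1 by exact_mod_cast rfl]
    exact pvSliceBlock s hs xs k

lemma pvPadLast_cons (s : Int) (c : List Int) (rest : List (List Int)) (h : rest ≠ []) :
    pvPadLast s (c :: rest) = c :: pvPadLast s rest := by
  cases rest with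
  | nil => exact absurd rfl h
  | cons r rs =>
    cases hE : (r :: rs).getLast? with
    | none => simp at hE
    | some last =>
      simp only [pvPadLast, List.getLast?_cons_cons, hE]
      split_ifs with hlt
      · simp [List.dropLast_cons₂]
      · rfl

lemma pvFoldlApp {α β : Type} (f : α → β) (l : List α) (init : List β) :
    l.foldl (fun acc x => acc ++ [f x]) init = init ++ l.map f := by
  induction l generalizing init with
  | nil => simp
  | cons a t ih => simp [ih]

lemma pvA_eq_padlast_msl (xs : List Int) (s : Int) :
    measures_from_notes_py xs s = pvPadLast s (pvMsl s xs) := by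
  unfold measures_from_notes_py pvMsl
  rw [pvFoldlApp]
  simp

lemma pvA_chunk_aux (s : Int) (hs : 0 < s) (n : Nat) :
    ∀ xs : List Int, xs.length ≤ n → pvPadLast s (pvMsl s xs) = pvChunkPad (s.toNat - 1) xs := by
  induction n with
  | zero =>
    intro xs hle
    have hx : xs = [] := List.eq_nil_of_length_eq_zero (by omega)
    subst hx
    simp [pvMsl_nil s hs, pvPadLast, pvChunkPad_nil]
  | succ n ih =>
    intro xs hle
    cases hxs : xs with
    | nil => simp [pvMsl_nil s hs, pvPadLast, pvChunkPad_nil]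
    | cons a t =>
      rw [← hxs]
      have hne : xs ≠ [] := by rw [hxs]; simp
      have hm : 0 < s.toNat := by omega
      have hmk : s.toNat - 1 + 1 = s.toNat := by omega
      rw [pvMsl_cons s hs xs hne]
      by_cases ht : xs.drop s.toNat = []
      · have hnm : xs.length ≤ s.toNat := by
          have := congrArg List.length ht
          simp at this
          omega
        rw [ht, pvMsl_nil s hs,
            pvChunkPad_cons _ _ hne, hmk, ht, pvChunkPad_nil,
            List.take_of_length_le hnm]
        simp only [pvPadLast, List.getLast?_singleton]
        by_cases hlt : ((xs.length : Int)) < s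
        · rw [if_pos hlt]
          have hc : (s - (xs.length : Int)).toNat = s.toNat - xs.length := by omega
          simp [hc]
        · rw [if_neg hlt]
          have h0 : s.toNat - xs.length = 0 := by omega
          rw [h0]
          simp
      · have hmn : s.toNat < xs.length := by
          by_contra hcon
          exact ht (List.drop_eq_nil_of_le (by omega))
        rw [pvMsl_cons s hs _ ht, pvPadLast_cons s _ _ (by simp),
            ← pvMsl_cons s hs _ ht,
            ih (xs.drop s.toNat) (by simp [List.length_drop]; omega),
            pvChunkPad_cons _ _ hne, hmk]
        have h0 : s.toNat - xs.length = 0 := by omega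
        rw [h0]
        simp

lemma pvA_chunk (s : Int) (hs : 0 < s) (xs : List Int) :
    pvPadLast s (pvMsl s xs) = pvChunkPad (s.toNat - 1) xs :=
  pvA_chunk_aux s hs xs.length xs le_rfl

-- B's loop body
def pvStep (s : Int) (p : List (List Int) × List Int) (note : Int) : List (List Int) × List Int :=
  let cur := p.2 ++ [note]
  if (cur.length : Int) = s then (p.1 ++ [cur], []) else (p.1, cur)

-- B's trailing 'if current: pad and append'
def pvFinish (s : Int) (p : List (List Int) × List Int) : List (List Int) :=
  if p.2 = [] then p.1
  else p.1 ++ [p.2 ++ List.replicate (s - (p.2.length : Int)).toNat (p.2.getLastD 0)]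

-- loop invariant for B: with a partial buffer cur (shorter than the measure), finishing the
-- fold over xs produces the canonical chunking of cur ++ xs, appended to the accumulator
lemma pvB_inv (s : Int) (hs : 0 < s) (xs : List Int) :
    ∀ (acc : List (List Int)) (cur : List Int), cur.length < s.toNat →
      pvFinish s (xs.foldl (pvStep s) (acc, cur)) = acc ++ pvChunkPad (s.toNat - 1) (cur ++ xs) := by
  induction xs with
  | nil =>
    intro acc cur hcur
    simp only [List.foldl_nil, List.append_nil]
    by_cases hc : cur = []
    · subst hc
      simp [pvFinish, pvChunkPad_nil]
    · have hmk : s.toNat - 1 + 1 = s.toNat := by omega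
      rw [pvChunkPad_cons _ _ hc, hmk, List.take_of_length_le hcur.le,
          List.drop_eq_nil_of_le hcur.le, pvChunkPad_nil]
      simp only [pvFinish, hc]
      have hrep : (s - (cur.length : Int)).toNat = s.toNat - cur.length := by omega
      rw [hrep]
      simp
  | cons x t ih =>
    intro acc cur hcur
    simp only [List.foldl_cons]
    by_cases hfull : ((cur ++ [x]).length : Int) = s
    · have hstep : pvStep s (acc, cur) x = (acc ++ [cur ++ [x]], []) := by
        simp only [pvStep, hfull, if_pos]
      rw [hstep, ih (acc ++ [cur ++ [x]]) [] (by simpa using hs)]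
      have hne : cur ++ x :: t ≠ [] := by simp
      have hmk : s.toNat - 1 + 1 = s.toNat := by omega
      have hlen : (cur ++ [x]).length = s.toNat := by
        have := hfull
        simp at this ⊢
        omega
      have hsplit : cur ++ x :: t = (cur ++ [x]) ++ t := by simp
      have h1 : s.toNat ≤ (cur ++ [x]).length := by omega
      have h2 : (cur ++ [x]).length ≤ s.toNat := by omega
      rw [pvChunkPad_cons _ _ hne, hmk, hsplit,
          List.take_append_of_le_length h1,
          List.drop_append_of_le_length h1,
          List.take_of_length_le h2,
          List.drop_eq_nil_of_le h2]
      have h0 : s.toNat - ((cur ++ [x]) ++ t).length = 0 := by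
        simp only [List.length_append, List.length_cons, List.length_nil] at hlen ⊢
        omega
      rw [h0]
      simp
    · have hstep : pvStep s (acc, cur) x = (acc, cur ++ [x]) := by
        simp only [pvStep, hfull, if_false]
      have hlt : (cur ++ [x]).length < s.toNat := by
        simp only [List.length_append, List.length_cons, List.length_nil] at hfull ⊢
        omega
      rw [hstep, ih acc (cur ++ [x]) hlt]
      simp

lemma pvB_chunk (s : Int) (hs : 0 < s) (xs : List Int) :
    measures_from_notes_py_alt xs s = pvChunkPad (s.toNat - 1) xs := by
  have hB : measures_from_notes_py_alt xs s = pvFinish s (xs.foldl (pvStep s) ([], [])) := by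
    simp only [measures_from_notes_py_alt, if_neg (not_le.2 hs)]
    rfl
  rw [hB, pvB_inv s hs xs [] [] (by simpa using hs)]
  simp

lemma pvPyRange_neg_nil (s n : Int) (hn : 0 ≤ n) (hs : s < 0) :
    PySem.List.pyRange 0 n s = [] := by
  simp only [PySem.List.pyRange]
  split_ifs <;> simp_all <;> omega

-- ===== VERDICT (by name: the statement is the Claim_ definition above) =====
theorem measures_from_notes_py_spec : Claim_equal_measures_from_notes_py := by
  intro notes ml _ hPre
  unfold Spec_measures_from_notes_py
  rcases lt_trichotomy ml 0 with hlt | heq | hgt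
  · have hr : PySem.List.pyRange 0 (notes.length : Int) ml = [] :=
      pvPyRange_neg_nil ml _ (by positivity) hlt
    simp [measures_from_notes_py, measures_from_notes_py_alt, hr, pvPadLast, hlt.le]
  · exact absurd heq hPre
  · rw [pvA_eq_padlast_msl, pvA_chunk ml hgt, pvB_chunk ml hgt]
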